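-- pv_equiv track=rewrite | github.com/GuziEconomy/python-guzi-lib | guzilib/crypto.py | zip_positions
-- ===== SOURCE A (Python) =====
-- import itertools
--
-- def zip_positions(positions):
--     """
--     From [('2020-12-22',0),('2020-12-23',0),('2020-12-23',1),('2020-12-24',0)]
--     To   [(['2020-12-22'], [0]),(['2020-12-23'], [0, 1]),(['2020-12-24'], [0])]
--     """
--     # 1. [('2020-12-22',0),('2020-12-22',1),('2020-12-23',0),('2020-12-23',1)]
--     # => [(['2020-12-22'], [0, 1]), (['2020-12-23'], [0, 1])]
--     tmp_result = []
--     for key, group in itertools.groupby(positions, lambda x: x[0]):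
--         tmp_result += [(key, [g[1] for g in group])]
--
--     # 2. [(['2020-12-22'], [0, 1]), (['2020-12-23'], [0, 1])]
--     # => [(['2020-12-22', '2020-12-23'], [0, 1])]
--     result = []
--     for key, group in itertools.groupby(tmp_result, lambda x: x[1]):
--         result += [([g[0] for g in group], key)]
--
--     return result
-- ===== SOURCE B (Python) =====
-- def zip_positions(positions):
--     result = []
--     i = 0
--     n = len(positions)
--     while i < n:
--         date = positions[i][0]
--         idxs = []
--         while i < n and positions[i][0] == date:
--             idxs.append(positions[i][1])
--             i += 1
--         if result and result[-1][1] == idxs: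
--             result[-1][0].append(date)
--         else:
--             result.append(([date], idxs))
--     return result
-- ===== Notes on version B (the rewrite author's own statement) =====
-- stated objective: simpler
-- what changed: Replaces the two sequential itertools.groupby passes and the tmp_result intermediate with a single index loop over positions that collects each date-run's index list and either extends the last group's date list or starts a new group.
import Mathlib
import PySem

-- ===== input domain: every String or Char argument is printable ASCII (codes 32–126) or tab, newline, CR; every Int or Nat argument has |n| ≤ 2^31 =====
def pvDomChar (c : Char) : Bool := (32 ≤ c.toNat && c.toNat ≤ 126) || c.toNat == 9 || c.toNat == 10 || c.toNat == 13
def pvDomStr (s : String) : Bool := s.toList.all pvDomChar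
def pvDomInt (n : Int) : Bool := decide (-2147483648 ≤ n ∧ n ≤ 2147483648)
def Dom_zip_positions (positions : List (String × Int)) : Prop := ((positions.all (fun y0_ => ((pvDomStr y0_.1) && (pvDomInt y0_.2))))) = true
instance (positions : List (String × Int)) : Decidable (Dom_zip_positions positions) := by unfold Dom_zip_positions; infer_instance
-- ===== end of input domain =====

-- B fuses A's two itertools.groupby passes into a single run-walking loop over positions
-- (simpler: drops the tmp_result intermediate). Equivalence proved for the return value; both are total.

-- ===== PORT A =====
-- itertools.groupby: consecutive runs of elements with equal key (exact for this use)
def pvGroupBy {α β : Type} [BEq β] (f : α → β) : List α → List (β × List α)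
  | [] => []
  | a :: rest =>
    (f a, a :: rest.takeWhile (fun x => f x == f a)) ::
      pvGroupBy f (rest.dropWhile (fun x => f x == f a))
termination_by l => l.length
decreasing_by simpa using Nat.lt_succ_of_le (List.length_dropWhile_le _ _)

def zip_positions (positions : List (String × Int)) : List (List String × List Int) :=
  let tmp_result := (pvGroupBy (fun x => x.1) positions).map (fun kg => (kg.1, kg.2.map (fun g => g.2)))
  (pvGroupBy (fun x => x.2) tmp_result).map (fun kg => (kg.2.map (fun g => g.1), kg.1))

-- ===== PORT B =====
-- the outer while loop of Source B: consume one date-run, merge it into the accumulated result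
def pvBLoop : List (String × Int) → List (List String × List Int) → List (List String × List Int)
  | [], result => result
  | (date, x) :: rest, result =>
    let idxs := x :: (rest.takeWhile (fun p => p.1 == date)).map (fun p => p.2)
    let rest' := rest.dropWhile (fun p => p.1 == date)
    let result' :=
      match result.getLast? with
      | some (ds, ks) =>
        if ks == idxs then result.dropLast ++ [(ds ++ [date], idxs)]
        else result ++ [([date], idxs)]
      | none => result ++ [([date], idxs)]
    pvBLoop rest' result'
termination_by l => l.length
decreasing_by simpa using Nat.lt_succ_of_le (List.length_dropWhile_le _ _)

def zip_positions_alt (positions : List (String × Int)) : List (List String × List Int) :=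
  pvBLoop positions []

-- ===== PRECONDITION & SPEC =====
def Spec_zip_positions (positions : List (String × Int)) (out : List (List String × List Int)) : Prop := out = zip_positions_alt positions
instance (positions : List (String × Int)) (out : List (List String × List Int)) : Decidable (Spec_zip_positions positions out) := by unfold Spec_zip_positions; infer_instance

-- ===== CLAIM (what is proved, stated in full; the proofs are below) =====
def Claim_equal_zip_positions : Prop := ∀ (positions : List (String × Int)), Dom_zip_positions positions → Spec_zip_positions positions (zip_positions positions)

-- ===== LEMMAS AND PROOFS =====

-- first pass of A (date-runs with their index lists)
def pvTmp (l : List (String × Int)) : List (String × List Int) :=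
  (pvGroupBy (fun x => x.1) l).map (fun kg => (kg.1, kg.2.map (fun g => g.2)))

-- fused form of A's second pass
def pvF : List (String × List Int) → List (List String × List Int)
  | [] => []
  | (d, ks) :: rest =>
    (d :: (rest.takeWhile (fun p => p.2 == ks)).map (fun p => p.1), ks) ::
      pvF (rest.dropWhile (fun p => p.2 == ks))
termination_by l => l.length
decreasing_by simpa using Nat.lt_succ_of_le (List.length_dropWhile_le _ _)

-- B's per-run merge step, at the level of (date, index-list) runs
def pvStep (result : List (List String × List Int)) (d : String) (ks : List Int) :
    List (List String × List Int) :=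
  match result.getLast? with
  | some (ds, ks') =>
    if ks' == ks then result.dropLast ++ [(ds ++ [d], ks)]
    else result ++ [([d], ks)]
  | none => result ++ [([d], ks)]

def pvG : List (String × List Int) → List (List String × List Int) → List (List String × List Int)
  | [], result => result
  | (d, ks) :: rest, result => pvG rest (pvStep result d ks)

theorem pvTmp_cons (d : String) (x : Int) (rest : List (String × Int)) :
    pvTmp ((d, x) :: rest) =
      (d, x :: (rest.takeWhile (fun p => p.1 == d)).map (fun p => p.2)) ::
        pvTmp (rest.dropWhile (fun p => p.1 == d)) := by
  unfold pvTmp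
  rw [pvGroupBy]
  simp

theorem pvBLoop_eq_pvG (l : List (String × Int)) (result : List (List String × List Int)) :
    pvBLoop l result = pvG (pvTmp l) result := by
  induction l, result using pvBLoop.induct with
  | case1 result' => simp [pvBLoop, pvTmp, pvGroupBy, pvG]
  | case2 date x rest result' idxs rest' res'' ih =>
    rw [pvBLoop, pvTmp_cons, pvG]
    exact ih

-- A's second pass equals the fused pvF
theorem pass2_eq_pvF (tmp : List (String × List Int)) :
    (pvGroupBy (fun x => x.2) tmp).map (fun kg => (kg.2.map (fun g => g.1), kg.1)) = pvF tmp := by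
  induction tmp using pvF.induct with
  | case1 => simp [pvGroupBy, pvF]
  | case2 d ks rest ih =>
    rw [pvGroupBy, pvF]
    simp only [List.map_cons]
    rw [ih]

theorem pvG_invariant (tmp : List (String × List Int)) (pre : List (List String × List Int))
    (ds : List String) (ks : List Int) :
    pvG tmp (pre ++ [(ds, ks)]) =
      pre ++ ((ds ++ (tmp.takeWhile (fun p => p.2 == ks)).map (fun p => p.1), ks) ::
        pvF (tmp.dropWhile (fun p => p.2 == ks))) := by
  induction tmp generalizing pre ds ks with
  | nil => simp [pvG, pvF]
  | cons hd rest ih =>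
    obtain ⟨d, ks'⟩ := hd
    rw [pvG]
    by_cases h : ks' = ks
    · subst h
      have hstep : pvStep (pre ++ [(ds, ks')]) d ks' = pre ++ [(ds ++ [d], ks')] := by
        simp [pvStep]
      rw [hstep, ih]
      simp
    · have hb : (ks' == ks) = false := by simp [h]
      have hb2 : ((ks : List Int) == ks') = false := by
        simp only [beq_eq_false_iff_ne, ne_eq]
        exact fun hh => h hh.symm
      have hstep : pvStep (pre ++ [(ds, ks)]) d ks' = (pre ++ [(ds, ks)]) ++ [([d], ks')] := by
        simp [pvStep, hb2]
      rw [hstep, ih]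
      rw [List.takeWhile_cons, List.dropWhile_cons]
      simp [hb, pvF]

theorem pvG_nil_eq_pvF (tmp : List (String × List Int)) : pvG tmp [] = pvF tmp := by
  cases tmp with
  | nil => simp [pvG, pvF]
  | cons hd rest =>
    obtain ⟨d, ks⟩ := hd
    rw [pvG]
    have hstep : pvStep [] d ks = [] ++ [([d], ks)] := by simp [pvStep]
    rw [hstep, pvG_invariant, pvF]
    simp

-- ===== VERDICT (by name: the statement is the Claim_ definition above) =====
theorem zip_positions_spec : Claim_equal_zip_positions := by
  intro positions _
  unfold Spec_zip_positions zip_positions zip_positions_alt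
  rw [pvBLoop_eq_pvG, pvG_nil_eq_pvF, ← pass2_eq_pvF]
  rfl
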